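-- pv_equiv track=rewrite | github.com/Tirik123/EidP01 | Altklausuren/Klausur 3/Tests.py | letter_occurence
-- ===== SOURCE A (Python) =====
-- def letter_occurence(input: str) -> str:
--     chars = dict()
--     for c in input:
--         if not c.isupper() and not c.islower():
--             return 'error'
--         if c in chars:
--             chars[c] += 1
--         else:
--             chars[c] = 1
--
--     maximum_doubling = max(chars.values())
--     if maximum_doubling <= 1:
--         return 'einfach'
--     elif maximum_doubling <= 2:
--         return 'doppelt'
--     else:
--         return 'mehrfach'
-- ===== SOURCE B (Python) =====
-- def letter_occurence(input: str) -> str: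
--     if any(not (c.isupper() or c.islower()) for c in input):
--         return 'error'
--     longest = 0
--     run = 0
--     prev = None
--     for c in sorted(input):
--         run = run + 1 if c == prev else 1
--         prev = c
--         if run > longest:
--             longest = run
--     if longest <= 1:
--         return 'einfach'
--     elif longest <= 2:
--         return 'doppelt'
--     else:
--         return 'mehrfach'
-- ===== Notes on version B (the rewrite author's own statement) =====
-- stated objective: alternative
-- what changed: Replaces the incremental frequency dict and max(values) with a single any() validation pass plus a sort-and-longest-run scan over sorted(input).
import Mathlib
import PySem

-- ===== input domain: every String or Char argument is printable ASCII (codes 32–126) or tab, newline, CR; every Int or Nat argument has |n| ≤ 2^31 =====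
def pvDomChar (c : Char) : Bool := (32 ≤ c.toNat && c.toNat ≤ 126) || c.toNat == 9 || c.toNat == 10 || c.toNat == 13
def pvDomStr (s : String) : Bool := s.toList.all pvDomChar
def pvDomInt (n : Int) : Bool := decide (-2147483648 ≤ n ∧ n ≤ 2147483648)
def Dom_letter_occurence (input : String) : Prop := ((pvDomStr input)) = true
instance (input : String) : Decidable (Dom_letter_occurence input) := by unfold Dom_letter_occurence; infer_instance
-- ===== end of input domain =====

-- B replaces A's frequency dict + max(values) with a validation pass and a longest-run scan over the sorted string (alternative decomposition, not faster).


-- ===== PORT A =====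
-- loop of A: builds the frequency dict, with the early 'error' return
def pvGoA : List Char → PySem.Dict Char Int → String
  | [], chars =>
    match PySem.List.max? chars.values (fun v => v) with
    | some maximum_doubling =>
        if maximum_doubling ≤ 1 then "einfach"
        else if maximum_doubling ≤ 2 then "doppelt"
        else "mehrfach"
    | none => ""   -- Python raises ValueError here (max of an empty sequence); excluded by Pre_
  | c :: rest, chars =>
    if !PySem.Chars.isupper c && !PySem.Chars.islower c then "error"
    else if chars.contains c then pvGoA rest (chars.insert c (chars.getD c 0 + 1))
    else pvGoA rest (chars.insert c 1)

def letter_occurence (input : String) : String := pvGoA input.toList PySem.Dict.empty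

-- ===== PORT B =====
-- one step of B's run-length scan over the sorted characters: state = (longest, run, prev)
def pvScan (st : Int × Int × Option Char) (c : Char) : Int × Int × Option Char :=
  let run : Int := if some c = st.2.2 then st.2.1 + 1 else 1
  let prev : Option Char := some c
  let longest : Int := if st.1 < run then run else st.1
  (longest, run, prev)

def letter_occurence_alt (input : String) : String :=
  let cs := input.toList
  if cs.any (fun c => !(PySem.Chars.isupper c || PySem.Chars.islower c)) then "error"
  else
    let longest := ((PySem.List.sorted cs (fun c => c) false).foldl pvScan (0, 0, none)).1
    if longest ≤ 1 then "einfach"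
    else if longest ≤ 2 then "doppelt"
    else "mehrfach"

-- ===== PRECONDITION & SPEC =====
-- Pre_ excludes only the empty string, on which A raises ValueError (max() of an empty sequence).
def Pre_letter_occurence (input : String) : Prop := input ≠ ""
instance (input : String) : Decidable (Pre_letter_occurence input) := by unfold Pre_letter_occurence; infer_instance
def pvWitness_letter_occurence : String := "aab"

def Spec_letter_occurence (input : String) (out : String) : Prop := out = letter_occurence_alt input
instance (input : String) (out : String) : Decidable (Spec_letter_occurence input out) := by unfold Spec_letter_occurence; infer_instance

-- ===== CLAIM (what is proved, stated in full; the proofs are below) =====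
def Claim_equal_letter_occurence : Prop := ∀ (input : String), Dom_letter_occurence input → Pre_letter_occurence input → Spec_letter_occurence input (letter_occurence input)

-- ===== LEMMAS AND PROOFS =====

-- if any character fails the letter test, A's loop returns "error" whatever the dict holds
lemma pvGoA_error (l : List Char) (d : PySem.Dict Char Int)
    (h : ∃ c ∈ l, (!PySem.Chars.isupper c && !PySem.Chars.islower c) = true) :
    pvGoA l d = "error" := by
  induction l generalizing d with
  | nil => simp at h
  | cons c rest ih =>
    by_cases hc : (!PySem.Chars.isupper c && !PySem.Chars.islower c) = true
    · simp [pvGoA, hc]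
    · rcases h with ⟨x, hx, hbad⟩
      rcases List.mem_cons.mp hx with hx | hx
      · exact absurd (hx ▸ hbad) hc
      · simp only [pvGoA, hc, Bool.false_eq_true, if_false]
        split <;> exact ih _ ⟨x, hx, hbad⟩

-- when every character passes, A's loop is the counter fold followed by the classification
lemma pvGoA_letters (l : List Char) (d : PySem.Dict Char Int)
    (h : ∀ c ∈ l, (!PySem.Chars.isupper c && !PySem.Chars.islower c) = false) :
    pvGoA l d = pvGoA [] (l.foldl (fun d c => d.insert c (d.getD c 0 + 1)) d) := by
  induction l generalizing d with
  | nil => rfl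
  | cons c rest ih =>
    have hc := h c (by simp)
    have hrest : ∀ x ∈ rest, (!PySem.Chars.isupper x && !PySem.Chars.islower x) = false :=
      fun x hx => h x (by simp [hx])
    simp only [pvGoA, hc, Bool.false_eq_true, if_false, List.foldl_cons]
    by_cases hm : d.contains c = true
    · simp [hm, ih _ hrest, pvGoA]
    · have hm' : d.contains c = false := by simpa using hm
      have : d.getD c 0 = 0 := by rw [PySem.Dict.getD_of_not_contains] <;> simp [hm']
      simp [hm', ih _ hrest, this, pvGoA]

-- invariant of B's run-length scan over a ≤-sorted list: state = (max count so far, count of last element, last element)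
lemma pvScan_inv (p : List Char) (hp : p.Pairwise (· ≤ ·)) (hne : p ≠ []) :
    ∃ L e, p.foldl pvScan (0, 0, none) = (L, (p.count e : Int), some e) ∧
      e ∈ p ∧ (∀ x ∈ p, x ≤ e) ∧ (∃ c ∈ p, L = (p.count c : Int)) ∧ (∀ c ∈ p, (p.count c : Int) ≤ L) := by
  induction p using List.reverseRecOn with
  | nil => exact absurd rfl hne
  | append_singleton q c ih =>
    rcases List.pairwise_append.mp hp with ⟨hq, -, hcross⟩
    have hle : ∀ x ∈ q, x ≤ c := fun x hx => hcross x hx c (by simp)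
    rcases eq_or_ne q [] with hq0 | hq0
    · subst hq0
      exact ⟨1, c, by simp [pvScan], by simp, by simp, ⟨c, by simp⟩, by simp⟩
    · obtain ⟨L, e, hfold, he, hmax, ⟨a, ha, haL⟩, hdom⟩ := ih hq hq0
      have hL1 : (1 : Int) ≤ L := haL ▸ by exact_mod_cast List.one_le_count_iff.mpr ha
      have hmaxc : ∀ x ∈ q ++ [c], x ≤ c := by
        intro x hx; rcases List.mem_append.mp hx with hx | hx
        · exact hle x hx
        · simp at hx; exact le_of_eq hx
      rw [List.foldl_append, hfold]
      by_cases hce : c = e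
      · subst hce
        have hrun : (((q ++ [c]).count c : Int)) = (q.count c : Int) + 1 := by
          simp [List.count_append]
        refine ⟨if L < (q.count c : Int) + 1 then (q.count c : Int) + 1 else L, c, ?_,
          by simp, hmaxc, ?_, ?_⟩
        · simp [pvScan, hrun]
        · by_cases hLt : L < (q.count c : Int) + 1
          · exact ⟨c, by simp, by simp [hLt, hrun]⟩
          · refine ⟨a, by simp [ha], ?_⟩
            have hac : a ≠ c := by rintro rfl; omega
            have hca : (((q ++ [c]).count a : Int)) = (q.count a : Int) := by
              simp [List.count_append, List.count_cons, hac, Ne.symm hac]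
            rw [if_neg hLt, hca, haL]
        · intro x hx
          rcases List.mem_append.mp hx with hx | hx
          · by_cases hxc : x = c
            · subst hxc; rw [hrun]; split <;> omega
            · have h2 : (((q ++ [c]).count x : Int)) = (q.count x : Int) := by
                simp [List.count_append, List.count_cons, hxc, Ne.symm hxc]
              rw [h2]; have := hdom x hx; split <;> omega
          · simp at hx; subst hx; rw [hrun]; split <;> omega
      · have hcq : c ∉ q := fun hcq => hce (le_antisymm (hmax c hcq) (hle e he))
        have hc1 : (((q ++ [c]).count c : Int)) = 1 := by
          simp [List.count_append, List.count_eq_zero.mpr hcq]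
        have hstep : pvScan (L, (q.count e : Int), some e) c = (L, 1, some c) := by
          simp [pvScan, Option.some_inj.ne.mpr hce, hce]
          omega
        refine ⟨L, c, ?_, by simp, hmaxc, ?_, ?_⟩
        · simp only [List.foldl_cons, List.foldl_nil]; rw [hstep, hc1]
        · refine ⟨a, by simp [ha], ?_⟩
          have hac : a ≠ c := fun h => hcq (h ▸ ha)
          have hca : (((q ++ [c]).count a : Int)) = (q.count a : Int) := by
            simp [List.count_append, List.count_cons, hac, Ne.symm hac]
          rw [hca, haL]
        · intro x hx
          rcases List.mem_append.mp hx with hx | hx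
          · by_cases hxc : x = c
            · exact absurd (hxc ▸ hx) hcq
            · have h2 : (((q ++ [c]).count x : Int)) = (q.count x : Int) := by
                simp [List.count_append, List.count_cons, hxc, Ne.symm hxc]
              rw [h2]; exact hdom x hx
          · simp at hx; subst hx; rw [hc1]; exact hL1

-- ===== VERDICT (by name: the statement is the Claim_ definition above) =====
theorem letter_occurence_spec : Claim_equal_letter_occurence := by
  intro input _ hpre
  unfold Spec_letter_occurence letter_occurence letter_occurence_alt
  replace hpre : input ≠ "" := hpre
  have hlne : input.toList ≠ [] := fun h => hpre (String.toList_eq_nil_iff.mp h)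
  by_cases hbad : input.toList.any (fun c => !(PySem.Chars.isupper c || PySem.Chars.islower c)) = true
  · rw [if_pos hbad]
    apply pvGoA_error
    rcases List.any_eq_true.mp hbad with ⟨x, hx, hb⟩
    exact ⟨x, hx, by revert hb; cases PySem.Chars.isupper x <;> cases PySem.Chars.islower x <;> simp⟩
  · rw [if_neg hbad]
    have hall : ∀ c ∈ input.toList, (!PySem.Chars.isupper c && !PySem.Chars.islower c) = false := by
      intro c hc
      have := fun h => hbad (List.any_eq_true.mpr ⟨c, hc, h⟩)
      revert this; cases PySem.Chars.isupper c <;> cases PySem.Chars.islower c <;> simp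
    rw [pvGoA_letters _ _ hall, PySem.Dict.foldl_insert_getD_add_one_eq_counter]
    have hvals : (PySem.Dict.counter input.toList).values
        = (PySem.Set.ofList input.toList).map (fun k => (input.toList.count k : Int)) := by
      simp only [PySem.Dict.values, PySem.Dict.items_counter, List.map_map]; rfl
    set l := input.toList with hl
    set s := PySem.List.sorted l (fun c => c) false with hs
    have hperm : s.Perm l := PySem.List.sorted_perm l (fun c => c) false
    have hpair : s.Pairwise (· ≤ ·) := by
      have := PySem.List.sorted_pairwise (xs := l) (key := fun c => c) ; simpa using this
    have hsne : s ≠ [] := fun h => hlne ((PySem.List.sorted_eq_nil_iff l (fun c => c) false).mp h)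
    obtain ⟨L, e, hfold, he, -, ⟨cb, hcb, hcbL⟩, hdomB⟩ := pvScan_inv s hpair hsne
    rw [hfold]
    cases hm : PySem.List.max? (PySem.Dict.counter l).values (fun v => v) with
    | none =>
      exfalso
      rw [PySem.List.max?_eq_none_iff, hvals, List.map_eq_nil_iff] at hm
      rcases List.exists_mem_of_ne_nil l hlne with ⟨x, hx⟩
      have hx' : x ∈ PySem.Set.ofList l := (PySem.Set.mem_ofList _ _).mpr hx
      rw [hm] at hx'
      simp at hx'
    | some m =>
      have hmem : m ∈ (PySem.Dict.counter l).values := PySem.List.max?_mem hm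
      have hmaxA : ∀ y ∈ (PySem.Dict.counter l).values, y ≤ m := by
        have := PySem.List.max?_isMax hm; simpa using this
      rw [hvals] at hmem hmaxA
      have hmL : m = L := by
        rcases List.mem_map.mp hmem with ⟨k, hk, hkm⟩
        have hkl : k ∈ l := (PySem.Set.mem_ofList _ _).mp hk
        have h1 : m ≤ L := by
          have hks : k ∈ s := hperm.mem_iff.mpr hkl
          have := hdomB k hks
          rw [hperm.count_eq] at this
          omega
        have h2 : L ≤ m := by
          have hcbl : cb ∈ l := hperm.mem_iff.mp hcb
          have : (l.count cb : Int) ≤ m :=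
            hmaxA _ (List.mem_map.mpr ⟨cb, (PySem.Set.mem_ofList _ _).mpr hcbl, rfl⟩)
          rw [hcbL, hperm.count_eq]
          omega
        omega
      simp only [pvGoA, hm, hmL]
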